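-- pv_equiv track=rewrite | github.com/NitinOnlyCodes/main | BoredChef.py | bored_chef
-- ===== SOURCE A (Python) =====
-- def bored_chef(n: int, k: int, s: str) -> int:
--     # Write your code here.
--
--
--     ans=0
--     for ch in range(ord('a'), ord('z')+1):
--         cnt=0
--         for i in range(0,n):
--             if s[i] == chr(ch):
--                 cnt +=1
--         if cnt >= k:
--             ans = 1
--             break
--
--     return ans
-- ===== SOURCE B (Python) =====
-- def bored_chef(n: int, k: int, s: str) -> int:
--     # Sort the in-range lowercase letters, then one grouped scan for the longest
--     # run of equal letters; a run of length >= k means some letter occurs >= k times.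
--     chars = sorted(c for c in (s[i] for i in range(n)) if 'a' <= c <= 'z')
--     best = 0
--     run = 0
--     prev = None
--     for c in chars:
--         run = run + 1 if c == prev else 1
--         if best < run:
--             best = run
--         prev = c
--     return 1 if best >= k else 0
-- ===== Notes on version B (the rewrite author's own statement) =====
-- stated objective: alternative
-- what changed: Replaces A's 26 repeated rescans of the prefix (one counting pass per letter) by collecting the in-range lowercase letters once, sorting them, and finding the longest run of equal letters in a single grouped scan.
import Mathlib
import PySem

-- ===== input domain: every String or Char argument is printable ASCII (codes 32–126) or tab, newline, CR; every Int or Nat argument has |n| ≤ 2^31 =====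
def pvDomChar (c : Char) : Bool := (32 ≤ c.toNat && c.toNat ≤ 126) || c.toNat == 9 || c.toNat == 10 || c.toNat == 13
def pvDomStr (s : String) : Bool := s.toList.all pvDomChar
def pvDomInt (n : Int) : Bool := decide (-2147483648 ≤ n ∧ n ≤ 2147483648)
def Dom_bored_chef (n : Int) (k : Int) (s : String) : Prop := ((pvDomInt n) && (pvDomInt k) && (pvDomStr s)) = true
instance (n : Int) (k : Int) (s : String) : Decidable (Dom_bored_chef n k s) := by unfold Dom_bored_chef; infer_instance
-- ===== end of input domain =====

-- B replaces A's per-letter rescans by sort + one grouped scan for the longest run of equal letters (alternative algorithm, equal return value).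

-- ===== PORT A =====
def bored_chef_cnt (n : Int) (sl : List Char) (ch : Int) : Int :=
  (PySem.List.pyRange 0 n 1).foldl
    (fun cnt i => if PySem.List.pyGetD sl i ' ' = Char.ofNat ch.toNat then cnt + 1 else cnt) 0

def bored_chef_loop (n : Int) (k : Int) (sl : List Char) : List Int → Int
  | [] => 0
  | ch :: rest =>
      if bored_chef_cnt n sl ch ≥ k then 1 else bored_chef_loop n k sl rest

def bored_chef (n : Int) (k : Int) (s : String) : Int :=
  bored_chef_loop n k s.toList (PySem.List.pyRange 97 123 1)

-- ===== PORT B =====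
def bored_chef_lower (c : Char) : Bool := decide ('a' ≤ c) && decide (c ≤ 'z')

def bored_chef_scan : List Char → Nat → Nat → Option Char → Nat
  | [], best, _, _ => best
  | c :: t, best, run, prev =>
      let run' := if some c = prev then run + 1 else 1
      let best' := if best < run' then run' else best
      bored_chef_scan t best' run' (some c)

def bored_chef_chars (n : Int) (sl : List Char) : List Char :=
  ((PySem.List.pyRange 0 n 1).map (fun i => PySem.List.pyGetD sl i ' ')).filter bored_chef_lower

def bored_chef_alt (n : Int) (k : Int) (s : String) : Int :=
  let chars := PySem.List.sorted (bored_chef_chars n s.toList) (fun c => c) false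
  if (bored_chef_scan chars 0 0 none : Int) ≥ k then 1 else 0

-- ===== PRECONDITION & SPEC =====
-- Pre_ excludes exactly the inputs where Python A raises IndexError (n > len(s)); B raises there too.
def Pre_bored_chef (n : Int) (k : Int) (s : String) : Prop := n ≤ PySem.Str.len s
instance (n : Int) (k : Int) (s : String) : Decidable (Pre_bored_chef n k s) := by
  unfold Pre_bored_chef; infer_instance

def pvWitness_bored_chef : Int × Int × String := (3, 2, "aab")

def Spec_bored_chef (n : Int) (k : Int) (s : String) (out : Int) : Prop := out = bored_chef_alt n k s
instance (n : Int) (k : Int) (s : String) (out : Int) : Decidable (Spec_bored_chef n k s out) := by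
  unfold Spec_bored_chef; infer_instance

-- ===== CLAIM (what is proved, stated in full; the proofs are below) =====
def Claim_equal_bored_chef : Prop := ∀ (n : Int) (k : Int) (s : String),
  Dom_bored_chef n k s → Pre_bored_chef n k s → Spec_bored_chef n k s (bored_chef n k s)

-- ===== LEMMAS AND PROOFS =====
lemma scan_ge (t : List Char) : ∀ (best run : Nat) (prev : Option Char),
    best ≤ bored_chef_scan t best run prev := by
  induction t with
  | nil => intro best run prev; simp [bored_chef_scan]
  | cons c t ih =>
      intro best run prev
      simp only [bored_chef_scan]
      refine le_trans ?_ (ih _ _ _)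
      split_ifs <;> omega

lemma scan_runlead (c : Char) : ∀ (t : List Char), t.Pairwise (· ≤ ·) → (∀ x ∈ t, c ≤ x) →
    ∀ best run, run ≤ best → run + t.count c ≤ bored_chef_scan t best run (some c) := by
  intro t
  induction t with
  | nil => intro _ _ best run h; simp [bored_chef_scan]; omega
  | cons x t ih =>
      intro hp hall best run hrb
      simp only [bored_chef_scan]
      by_cases hx : some x = some c
      · have hx' : x = c := by simpa using hx
        subst hx'
        rw [if_pos hx]
        have h1 := ih (List.Pairwise.of_cons hp)
          (fun y hy => (List.pairwise_cons.mp hp).1 y hy)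
          (if best < run + 1 then run + 1 else best) (run + 1) (by split_ifs <;> omega)
        rw [List.count_cons_self]
        omega
      · have hx' : x ≠ c := by simpa using hx
        rw [if_neg hx]
        have hcnt : (x :: t).count c = 0 := by
          apply List.count_eq_zero_of_not_mem
          intro hc
          rcases List.mem_cons.mp hc with h | h
          · exact hx' h.symm
          · have h1 : c ≤ x := hall x List.mem_cons_self
            have h2 : x ≤ c := (List.pairwise_cons.mp hp).1 c h
            exact hx' (le_antisymm h2 h1)
        rw [hcnt]
        have hs := scan_ge t (if best < 1 then 1 else best) 1 (some x)
        have hb : best ≤ (if best < 1 then 1 else best) := by split_ifs <;> omega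
        omega

lemma scan_reach (l : List Char) : l.Pairwise (· ≤ ·) → ∀ c ∈ l, ∀ best run prev,
    l.count c ≤ bored_chef_scan l best run prev := by
  induction l with
  | nil => simp
  | cons x t ih =>
      intro hp c hc best run prev
      simp only [bored_chef_scan]
      by_cases hcx : c = x
      · subst hcx
        have hge : 1 ≤ (if some c = prev then run + 1 else 1) := by split_ifs <;> omega
        have h1 := scan_runlead c t (List.Pairwise.of_cons hp)
          (fun y hy => (List.pairwise_cons.mp hp).1 y hy)
          (if best < (if some c = prev then run + 1 else 1) then (if some c = prev then run + 1 else 1) else best)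
          (if some c = prev then run + 1 else 1)
          (by split_ifs <;> omega)
        rw [List.count_cons_self]
        omega
      · have hct : c ∈ t := by
          rcases List.mem_cons.mp hc with h | h
          · exact absurd h hcx
          · exact h
        have hcc : List.count c (x :: t) = List.count c t := by
          rw [List.count_cons]
          simp [Ne.symm hcx]
        rw [hcc]
        exact ih (List.Pairwise.of_cons hp) c hct _ _ _

lemma scan_sound : ∀ (l : List Char) (best run : Nat) (p : Char) (K : Nat),
    K ≤ bored_chef_scan l best run (some p) →
    K ≤ best ∨ K ≤ run + l.count p ∨ ∃ c ∈ l, K ≤ l.count c := by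
  intro l
  induction l with
  | nil => intro best run p K h; simp [bored_chef_scan] at h; exact Or.inl h
  | cons x t ih =>
      intro best run p K h
      simp only [bored_chef_scan] at h
      by_cases hxp : some x = some p
      · have hx' : x = p := by simpa using hxp
        subst hx'
        rw [if_pos hxp] at h
        rcases ih _ _ _ _ h with h1 | h2 | h3
        · by_cases hb : K ≤ best
          · exact Or.inl hb
          · refine Or.inr (Or.inl ?_)
            rw [List.count_cons_self]
            split_ifs at h1 <;> omega
        · refine Or.inr (Or.inl ?_)
          rw [List.count_cons_self]
          omega
        · rcases h3 with ⟨c, hc, hKc⟩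
          refine Or.inr (Or.inr ⟨c, List.mem_cons_of_mem _ hc, ?_⟩)
          rw [List.count_cons]
          split <;> omega
      · rw [if_neg hxp] at h
        have hx' : x ≠ p := by simpa using hxp
        rcases ih _ _ _ _ h with h1 | h2 | h3
        · by_cases hb : K ≤ best
          · exact Or.inl hb
          · refine Or.inr (Or.inr ⟨x, List.mem_cons_self, ?_⟩)
            rw [List.count_cons_self]
            split_ifs at h1 <;> omega
        · refine Or.inr (Or.inr ⟨x, List.mem_cons_self, ?_⟩)
          rw [List.count_cons_self]
          omega
        · rcases h3 with ⟨c, hc, hKc⟩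
          refine Or.inr (Or.inr ⟨c, List.mem_cons_of_mem _ hc, ?_⟩)
          rw [List.count_cons]
          split <;> omega

lemma scan_iff (l : List Char) (hp : l.Pairwise (· ≤ ·)) (k : Int) :
    (k ≤ (bored_chef_scan l 0 0 none : Int)) ↔ (k ≤ 0 ∨ ∃ c ∈ l, k ≤ (l.count c : Int)) := by
  constructor
  · intro h
    by_cases hk : k ≤ 0
    · exact Or.inl hk
    · push_neg at hk
      cases l with
      | nil => simp [bored_chef_scan] at h; omega
      | cons x t =>
          refine Or.inr ?_
          norm_num [bored_chef_scan] at h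
          have hK : k.toNat ≤ bored_chef_scan t 1 1 (some x) := by omega
          rcases scan_sound t 1 1 x k.toNat hK with h1 | h2 | h3
          · exact ⟨x, List.mem_cons_self, by rw [List.count_cons_self]; omega⟩
          · exact ⟨x, List.mem_cons_self, by rw [List.count_cons_self]; omega⟩
          · rcases h3 with ⟨c, hc, hKc⟩
            refine ⟨c, List.mem_cons_of_mem _ hc, ?_⟩
            rw [List.count_cons]
            split <;> omega
  · intro h
    rcases h with hk | ⟨c, hc, hkc⟩
    · have : (0 : Int) ≤ (bored_chef_scan l 0 0 none : Int) := Int.natCast_nonneg _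
      omega
    · have := scan_reach l hp c hc 0 0 none
      omega

lemma loop_eq (n k : Int) (sl : List Char) : ∀ L, bored_chef_loop n k sl L =
    if ∃ ch ∈ L, bored_chef_cnt n sl ch ≥ k then 1 else 0 := by
  intro L
  induction L with
  | nil => simp [bored_chef_loop]
  | cons ch rest ih =>
      by_cases h : bored_chef_cnt n sl ch ≥ k
      · simp [bored_chef_loop, h]
      · simp [bored_chef_loop, ih, h]

lemma cnt_eq_count (n : Int) (sl : List Char) (ch : Int) :
    bored_chef_cnt n sl ch =
      ((((PySem.List.pyRange 0 n 1).map (fun i => PySem.List.pyGetD sl i ' ')).count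
        (Char.ofNat ch.toNat) : Nat) : Int) := by
  unfold bored_chef_cnt
  have hf : (fun (cnt : Int) (i : Int) =>
      if PySem.List.pyGetD sl i ' ' = Char.ofNat ch.toNat then cnt + 1 else cnt) =
      (fun (cnt : Int) (i : Int) =>
        if (fun j => PySem.List.pyGetD sl j ' ' == Char.ofNat ch.toNat) i = true then cnt + 1 else cnt) := by
    funext cnt i
    simp
  rw [hf, PySem.List.foldl_count_if]
  rw [List.count, List.countP_map]
  simp [Function.comp_def]

lemma sorted_count (n : Int) (sl : List Char) (c : Char) (hc : bored_chef_lower c = true) :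
    (PySem.List.sorted (bored_chef_chars n sl) (fun c => c) false).count c
      = ((PySem.List.pyRange 0 n 1).map (fun i => PySem.List.pyGetD sl i ' ')).count c := by
  rw [(PySem.List.sorted_perm (bored_chef_chars n sl) (fun c => c) false).count_eq]
  unfold bored_chef_chars
  exact List.count_filter hc

lemma lower_of_range (m : Nat) (h1 : 97 ≤ m) (h2 : m ≤ 122) :
    bored_chef_lower (Char.ofNat m) = true := by
  interval_cases m <;> decide

lemma range_of_lower (c : Char) (h : bored_chef_lower c = true) :
    97 ≤ c.toNat ∧ c.toNat ≤ 122 := by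
  unfold bored_chef_lower at h
  simp only [Bool.and_eq_true, decide_eq_true_eq] at h
  rcases h with ⟨h1, h2⟩
  rw [Char.le_def] at h1 h2
  constructor
  · exact UInt32.le_iff_toNat_le.mp h1
  · exact UInt32.le_iff_toNat_le.mp h2

-- ===== VERDICT (by name: the statement is the Claim_ definition above) =====
theorem bored_chef_spec : Claim_equal_bored_chef := by
  intro n k s _ _
  unfold Spec_bored_chef bored_chef
  simp only [bored_chef_alt]
  rw [loop_eq]
  refine if_congr ?_ rfl rfl
  have hpl : (PySem.List.sorted (bored_chef_chars n s.toList) (fun c => c) false).Pairwise (· ≤ ·) := by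
    have := PySem.List.sorted_pairwise (bored_chef_chars n s.toList) (fun c => c)
    simpa using this
  rw [ge_iff_le, scan_iff _ hpl k]
  constructor
  · rintro ⟨ch, hch, hk⟩
    rw [PySem.List.mem_pyRange_one] at hch
    by_cases hk0 : k ≤ 0
    · exact Or.inl hk0
    · refine Or.inr ?_
      have hlc : bored_chef_lower (Char.ofNat ch.toNat) = true :=
        lower_of_range ch.toNat (by omega) (by omega)
      rw [ge_iff_le, cnt_eq_count] at hk
      refine ⟨Char.ofNat ch.toNat, ?_, ?_⟩
      · rw [PySem.List.mem_sorted]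
        unfold bored_chef_chars
        exact List.mem_filter.mpr ⟨List.count_pos_iff.mp (by omega), hlc⟩
      · rw [sorted_count n s.toList _ hlc]
        exact hk
  · rintro (hk0 | ⟨c, hc, hkc⟩)
    · refine ⟨97, ?_, ?_⟩
      · rw [PySem.List.mem_pyRange_one]; omega
      · rw [ge_iff_le, cnt_eq_count]
        have h0 : (0 : Int) ≤
            ((((PySem.List.pyRange 0 n 1).map (fun i => PySem.List.pyGetD s.toList i ' ')).count
              (Char.ofNat (97 : Int).toNat) : Nat) : Int) := Int.natCast_nonneg _
        omega
    · have hcf : c ∈ bored_chef_chars n s.toList := (PySem.List.mem_sorted _ _ _ _).mp hc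
      have hlc : bored_chef_lower c = true := (List.mem_filter.mp hcf).2
      rcases range_of_lower c hlc with ⟨h97, h122⟩
      rw [sorted_count n s.toList c hlc] at hkc
      refine ⟨(c.toNat : Int), ?_, ?_⟩
      · rw [PySem.List.mem_pyRange_one]; omega
      · rw [ge_iff_le, cnt_eq_count, Int.toNat_natCast, Char.ofNat_toNat]
        exact hkc
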